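-- pv_equiv track=rewrite | github.com/8ryanWh1t3/DeepSigma | src/core/authority/authority_health.py | classify_authority_severity
-- ===== SOURCE A (Python) =====
-- from typing import Any, Dict, List
--
-- AUTHORITY_SEVERITY_ORDER = {"green": 0, "yellow": 1, "orange": 2, "red": 3}
--
-- def classify_authority_severity(signals: List[Dict[str, Any]]) -> str:
--     """Return the worst severity from a list of drift signals.
--
--     Severity model:
--         GREEN  = valid authority chain
--         YELLOW = near expiry / stale policy / weak custody
--         ORANGE = broken delegation / scope mismatch
--         RED    = unauthorized execution path / invalid signer / orphaned authority
--     """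
--     if not signals:
--         return "green"
--
--     worst = "green"
--     for sig in signals:
--         sev = sig.get("severity", "green")
--         if AUTHORITY_SEVERITY_ORDER.get(sev, 0) > AUTHORITY_SEVERITY_ORDER.get(worst, 0):
--             worst = sev
--     return worst
-- ===== SOURCE B (Python) =====
-- def classify_authority_severity(signals):
--     present = {sig.get("severity", "green") for sig in signals}
--     for name in ("red", "orange", "yellow"):
--         if name in present:
--             return name
--     return "green"
-- ===== Notes on version B (the rewrite author's own statement) =====
-- stated objective: simpler
-- what changed: B drops the severity-rank table and the running-max comparison entirely: it collects the set of severity strings present and returns the first canonical name found when scanning priorities red > orange > yellow, defaulting to green.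
import Mathlib
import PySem

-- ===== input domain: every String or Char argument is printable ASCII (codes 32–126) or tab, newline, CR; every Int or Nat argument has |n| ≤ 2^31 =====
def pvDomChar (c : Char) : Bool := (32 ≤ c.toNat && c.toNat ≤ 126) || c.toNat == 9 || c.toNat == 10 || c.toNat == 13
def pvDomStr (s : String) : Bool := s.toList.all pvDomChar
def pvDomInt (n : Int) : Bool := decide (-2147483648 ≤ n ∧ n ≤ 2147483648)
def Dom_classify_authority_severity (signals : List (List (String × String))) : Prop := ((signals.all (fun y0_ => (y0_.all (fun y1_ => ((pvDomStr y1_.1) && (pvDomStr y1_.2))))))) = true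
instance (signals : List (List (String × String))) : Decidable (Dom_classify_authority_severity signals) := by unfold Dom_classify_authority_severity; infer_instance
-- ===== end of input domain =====

-- B drops the rank table and running max: it builds the set of severities present
-- and returns the first of red/orange/yellow that occurs, else "green" (simpler).
-- ===== PORT A =====
-- shared module constant AUTHORITY_SEVERITY_ORDER
def sevOrder : PySem.Dict String Int :=
  PySem.Dict.ofList [("green", 0), ("yellow", 1), ("orange", 2), ("red", 3)]

-- port of A: explicit loop tracking the worst severity STRING
def classify_authority_severity (signals : List (List (String × String))) : String :=
  if signals = [] then "green"
  else
    signals.foldl (fun worst sig =>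
      let sev := (PySem.Dict.get? (PySem.Dict.ofList sig) "severity").getD "green"
      if sevOrder.getD sev 0 > sevOrder.getD worst 0 then sev else worst) "green"

-- ===== PORT B =====
-- port of B: the set of severity strings present, then scan the priority tuple
-- ("red","orange","yellow") for the first member (find? = the early-return loop),
-- defaulting to "green".
def classify_authority_severity_alt (signals : List (List (String × String))) : String :=
  let present : PySem.Set String :=
    PySem.Set.ofList (signals.map (fun sig =>
      (PySem.Dict.get? (PySem.Dict.ofList sig) "severity").getD "green"))
  (( ["red", "orange", "yellow"] : List String).find?
      (fun name => PySem.Set.contains present name)).getD "green"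

-- ===== PRECONDITION & SPEC =====
def Spec_classify_authority_severity (signals : List (List (String × String))) (out : String) : Prop := out = classify_authority_severity_alt signals
instance (signals : List (List (String × String))) (out : String) : Decidable (Spec_classify_authority_severity signals out) := by unfold Spec_classify_authority_severity; infer_instance

-- ===== CLAIM =====
def Claim_equal_classify_authority_severity : Prop := ∀ (signals : List (List (String × String))), Dom_classify_authority_severity signals → Spec_classify_authority_severity signals (classify_authority_severity signals)

-- ===== LEMMAS AND PROOFS =====

-- proof-only names for the lookups both ports make
def sevOf (sig : List (String × String)) : String :=
  (PySem.Dict.get? (PySem.Dict.ofList sig) "severity").getD "green"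

def oSev (s : String) : Int := sevOrder.getD s 0

-- the severity-order lookup takes one of four shapes
lemma o_cases (s : String) :
    oSev s = 0 ∨ (s = "yellow" ∧ oSev s = 1) ∨ (s = "orange" ∧ oSev s = 2) ∨ (s = "red" ∧ oSev s = 3) := by
  by_cases h1 : s = "green"
  · subst h1; left; decide
  by_cases h2 : s = "yellow"
  · subst h2; right; left; exact ⟨rfl, by decide⟩
  by_cases h3 : s = "orange"
  · subst h3; right; right; left; exact ⟨rfl, by decide⟩
  by_cases h4 : s = "red"
  · subst h4; right; right; right; exact ⟨rfl, by decide⟩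
  left
  have e1 : ("green" == s) = false := by simp [beq_eq_false_iff_ne]; exact Ne.symm h1
  have e2 : ("yellow" == s) = false := by simp [beq_eq_false_iff_ne]; exact Ne.symm h2
  have e3 : ("orange" == s) = false := by simp [beq_eq_false_iff_ne]; exact Ne.symm h3
  have e4 : ("red" == s) = false := by simp [beq_eq_false_iff_ne]; exact Ne.symm h4
  simp [oSev, sevOrder, PySem.Dict.ofList, PySem.Dict.update, PySem.Dict.insert, PySem.Dict.empty,
    PySem.Dict.getD_eq_get?_getD, PySem.Dict.contains, PySem.Dict.get?, List.find?, e1, e2, e3, e4]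

lemma oSev_bounds (s : String) : 0 ≤ oSev s ∧ oSev s ≤ 3 := by
  rcases o_cases s with h | ⟨_, h⟩ | ⟨_, h⟩ | ⟨_, h⟩ <;> omega

lemma oSev_eq_three (s : String) : oSev s = 3 ↔ s = "red" := by
  constructor
  · intro h
    rcases o_cases s with h0 | ⟨hs, h0⟩ | ⟨hs, h0⟩ | ⟨hs, _⟩
    · omega
    · omega
    · omega
    · exact hs
  · intro h; subst h; decide

lemma oSev_eq_two (s : String) : oSev s = 2 ↔ s = "orange" := by
  constructor
  · intro h
    rcases o_cases s with h0 | ⟨hs, h0⟩ | ⟨hs, _⟩ | ⟨hs, h0⟩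
    · omega
    · omega
    · exact hs
    · omega
  · intro h; subst h; decide

lemma oSev_eq_one (s : String) : oSev s = 1 ↔ s = "yellow" := by
  constructor
  · intro h
    rcases o_cases s with h0 | ⟨hs, _⟩ | ⟨hs, h0⟩ | ⟨hs, h0⟩
    · omega
    · exact hs
    · omega
    · omega
  · intro h; subst h; decide

-- notation for the running maximum A effectively computes
def mOf (signals : List (List (String × String))) : Int :=
  ((signals.map sevOf).map oSev).foldl max 0

-- A's loop returns the severity string of the running maximum when positive
lemma foldA_eq (l : List (List (String × String))) (w : String) (hw : 0 ≤ oSev w) :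
    ∃ r, (l.foldl (fun worst sig =>
        let sev := (PySem.Dict.get? (PySem.Dict.ofList sig) "severity").getD "green"
        if sevOrder.getD sev 0 > sevOrder.getD worst 0 then sev else worst) w) = r ∧
      oSev r = ((l.map sevOf).map oSev).foldl max (oSev w) ∧ (r = w ∨ r ∈ l.map sevOf) := by
  induction l generalizing w with
  | nil => exact ⟨w, rfl, rfl, Or.inl rfl⟩
  | cons sig t ih =>
    simp only [List.foldl_cons, List.map_cons]
    by_cases h : oSev (sevOf sig) > oSev w
    · have hstep : (if sevOrder.getD ((PySem.Dict.get? (PySem.Dict.ofList sig) "severity").getD "green") 0 >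
            sevOrder.getD w 0 then ((PySem.Dict.get? (PySem.Dict.ofList sig) "severity").getD "green") else w) = sevOf sig := by
        simp only [sevOf, oSev] at h ⊢; simp [h]
      rw [hstep]
      obtain ⟨r, hr, hm, hmem⟩ := ih (sevOf sig) (by omega)
      refine ⟨r, hr, ?_, ?_⟩
      · rw [hm]; congr 1; omega
      · rcases hmem with rfl | hmem
        · right; exact List.mem_cons_self
        · right; exact List.mem_cons_of_mem _ hmem
    · have hstep : (if sevOrder.getD ((PySem.Dict.get? (PySem.Dict.ofList sig) "severity").getD "green") 0 >
            sevOrder.getD w 0 then ((PySem.Dict.get? (PySem.Dict.ofList sig) "severity").getD "green") else w) = w := by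
        simp only [sevOf, oSev] at h ⊢; simp [h]
      rw [hstep]
      obtain ⟨r, hr, hm, hmem⟩ := ih w hw
      refine ⟨r, hr, ?_, ?_⟩
      · rw [hm]; congr 1; omega
      · rcases hmem with rfl | hmem
        · left; rfl
        · right; exact List.mem_cons_of_mem _ hmem

-- B's value determined by which canonical severities occur among the signals
lemma altB_char (signals : List (List (String × String))) :
    classify_authority_severity_alt signals =
      if "red" ∈ signals.map sevOf then "red"
      else if "orange" ∈ signals.map sevOf then "orange"
      else if "yellow" ∈ signals.map sevOf then "yellow"
      else "green" := by
  have hc : ∀ s : String,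
      PySem.Set.contains (PySem.Set.ofList (signals.map sevOf)) s = decide (s ∈ signals.map sevOf) := by
    intro s
    have hiff : PySem.Set.contains (PySem.Set.ofList (signals.map sevOf)) s = true ↔ s ∈ signals.map sevOf := by
      rw [PySem.Set.contains_iff, PySem.Set.mem_ofList]
    by_cases h : s ∈ signals.map sevOf
    · simp only [h, decide_true]; exact hiff.mpr h
    · simp only [h, decide_false]
      exact Bool.eq_false_iff.mpr (fun hcon => h (hiff.mp hcon))
  show ((["red", "orange", "yellow"] : List String).find?
      (fun name => PySem.Set.contains (PySem.Set.ofList (signals.map (fun sig =>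
        (PySem.Dict.get? (PySem.Dict.ofList sig) "severity").getD "green"))) name)).getD "green" = _
  rw [show (fun sig => (PySem.Dict.get? (PySem.Dict.ofList sig) "severity").getD "green") = sevOf from rfl]
  simp only [List.find?, hc]
  by_cases h1 : "red" ∈ signals.map sevOf <;> by_cases h2 : "orange" ∈ signals.map sevOf <;>
    by_cases h3 : "yellow" ∈ signals.map sevOf <;> simp [h1, h2, h3]

-- ===== VERDICT =====
theorem classify_authority_severity_spec : Claim_equal_classify_authority_severity := by
  intro signals _
  unfold Spec_classify_authority_severity
  rw [altB_char]
  unfold classify_authority_severity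
  cases hsig : signals with
  | nil => simp
  | cons sig t =>
    simp only [reduceCtorEq, if_false]
    obtain ⟨r, hr, hm, hmem⟩ := foldA_eq (sig :: t) "green" (by decide)
    rw [hr]
    set l := (sig :: t).map sevOf with hl
    have hM : oSev r = (l.map oSev).foldl max 0 := by
      have hg : oSev "green" = 0 := by decide
      rw [hm, hg]
    have hub : ∀ s ∈ l, oSev s ≤ oSev r := by
      intro s hs; rw [hM]
      exact (PySem.List.le_foldl_max _ _).2 _ (List.mem_map_of_mem hs)
    have hbnds := oSev_bounds r
    -- case on the value of the maximum
    have hcases : oSev r = 0 ∨ oSev r = 1 ∨ oSev r = 2 ∨ oSev r = 3 := by omega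
    have hatt : oSev r = 0 ∨ ∃ s ∈ l, oSev s = oSev r := by
      rcases PySem.List.foldl_max_mem (l.map oSev) 0 with h | h
      · left; rw [hM]; exact h
      · right; rw [hM] at *
        obtain ⟨s, hs, hse⟩ := List.mem_map.mp h
        exact ⟨s, hs, hse⟩
    rcases hcases with h0 | h1 | h2 | h3
    · -- max 0: none of red/orange/yellow occur, and r = "green" or oSev r = 0 forces branch
      have hnr : "red" ∉ l := fun h => by have := hub _ h; rw [(oSev_eq_three "red").mpr rfl] at this; omega
      have hno : "orange" ∉ l := fun h => by have := hub _ h; rw [(oSev_eq_two "orange").mpr rfl] at this; omega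
      have hny : "yellow" ∉ l := fun h => by have := hub _ h; rw [(oSev_eq_one "yellow").mpr rfl] at this; omega
      rw [if_neg hnr, if_neg hno, if_neg hny]
      -- r itself: either "green" (start) or a member with oSev = 0; but A only moves on strict
      -- increase, so r = "green" here: r = w-start or member with level ≤ 0, i.e. never updated.
      rcases hmem with rfl | hmeml
      · rfl
      · -- r ∈ l with oSev r = 0: A updated only on strict increase from 0, impossible ⇒ r is the
        -- start value. re-derive: the fold keeps w unless the new level is strictly greater.
        -- We show the fold result equals "green" directly when the max is 0.
        -- A never updates since every level ≤ 0; prove by a small induction.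
        have hall : ∀ s ∈ l, oSev s ≤ 0 := fun s hs => by have := hub s hs; omega
        have hgen : ∀ (m : List (List (String × String))), (∀ s ∈ m.map sevOf, oSev s ≤ 0) →
            (m.foldl (fun worst sig =>
              let sev := (PySem.Dict.get? (PySem.Dict.ofList sig) "severity").getD "green"
              if sevOrder.getD sev 0 > sevOrder.getD worst 0 then sev else worst) "green") = "green" := by
          intro m
          induction m with
          | nil => intro _; rfl
          | cons a b ihb =>
            intro hms
            have ha : oSev (sevOf a) ≤ 0 := hms _ (by simp [sevOf])
            have hstep : (if sevOrder.getD ((PySem.Dict.get? (PySem.Dict.ofList a) "severity").getD "green") 0 >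
                sevOrder.getD "green" 0 then ((PySem.Dict.get? (PySem.Dict.ofList a) "severity").getD "green") else "green") = "green" := by
              have : ¬ (oSev (sevOf a) > oSev "green") := by
                have : oSev "green" = 0 := by decide
                omega
              simp only [sevOf, oSev] at this ⊢; simp [this]
            simp only [List.foldl_cons, hstep]
            exact ihb (fun s hs => hms s (by simp at hs ⊢; tauto))
        have := hgen (sig :: t) (by rw [← hl]; exact hall)
        rw [hr] at this; subst this; rfl
    · -- max 1 ⇒ r = "yellow", no red/orange occur, yellow occurs
      have hry : r = "yellow" := (oSev_eq_one r).mp h1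
      have hnr : "red" ∉ l := fun h => by have := hub _ h; rw [(oSev_eq_three "red").mpr rfl] at this; omega
      have hno : "orange" ∉ l := fun h => by have := hub _ h; rw [(oSev_eq_two "orange").mpr rfl] at this; omega
      have hy : "yellow" ∈ l := by
        rcases hatt with h | ⟨s, hs, hse⟩
        · omega
        · rw [h1] at hse; rw [← (oSev_eq_one s).mp hse]; exact hs
      rw [if_neg hnr, if_neg hno, if_pos hy, hry]
    · have hro : r = "orange" := (oSev_eq_two r).mp h2
      have hnr : "red" ∉ l := fun h => by have := hub _ h; rw [(oSev_eq_three "red").mpr rfl] at this; omega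
      have ho : "orange" ∈ l := by
        rcases hatt with h | ⟨s, hs, hse⟩
        · omega
        · rw [h2] at hse; rw [← (oSev_eq_two s).mp hse]; exact hs
      rw [if_neg hnr, if_pos ho, hro]
    · have hrr : r = "red" := (oSev_eq_three r).mp h3
      have hred : "red" ∈ l := by
        rcases hatt with h | ⟨s, hs, hse⟩
        · omega
        · rw [h3] at hse; rw [← (oSev_eq_three s).mp hse]; exact hs
      rw [if_pos hred, hrr]
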